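-- pv_equiv track=rewrite | github.com/profsandromesquita/doutorado | reordenacao-cart-v1.py | split_trajectory_into_frames
-- ===== SOURCE A (Python) =====
-- from typing import List, Dict, Set, Tuple, Optional, Any
--
-- def split_trajectory_into_frames(content: str) -> List[str]:
--     """
--     Divide o conteúdo de uma trajetória em frames individuais.
--     Cada frame termina com TER seguido de ENDMDL.
--     """
--     frames = []
--     current_frame_lines = []
--     lines = content.splitlines()
--
--     for line in lines:
--         current_frame_lines.append(line)
--         if line.strip() == "ENDMDL":
--             frames.append("\n".join(current_frame_lines))
--             current_frame_lines = []
--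
--     # Se sobrou conteúdo sem ENDMDL (último frame incompleto)
--     if current_frame_lines:
--         remaining = "\n".join(current_frame_lines).strip()
--         if remaining:
--             frames.append(remaining)
--
--     return frames
-- ===== SOURCE B (Python) =====
-- def split_trajectory_into_frames(content):
--     lines = content.splitlines()
--     boundaries = [i for i, l in enumerate(lines) if l.strip() == "ENDMDL"]
--     frames = []
--     start = 0
--     for b in boundaries:
--         frames.append("\n".join(lines[start:b + 1]))
--         start = b + 1
--     tail = lines[start:]
--     if tail:
--         remaining = "\n".join(tail).strip()
--         if remaining:
--             frames.append(remaining)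
--     return frames
-- ===== Notes on version B (the rewrite author's own statement) =====
-- stated objective: alternative
-- what changed: Replaces A's single pass with a mutable current-frame buffer by a two-phase boundary-index approach: first collect the indices of ENDMDL lines, then slice the line list between consecutive boundaries and join each slice; the trailing slice is stripped and kept only if nonempty, as in A.
import Mathlib
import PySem

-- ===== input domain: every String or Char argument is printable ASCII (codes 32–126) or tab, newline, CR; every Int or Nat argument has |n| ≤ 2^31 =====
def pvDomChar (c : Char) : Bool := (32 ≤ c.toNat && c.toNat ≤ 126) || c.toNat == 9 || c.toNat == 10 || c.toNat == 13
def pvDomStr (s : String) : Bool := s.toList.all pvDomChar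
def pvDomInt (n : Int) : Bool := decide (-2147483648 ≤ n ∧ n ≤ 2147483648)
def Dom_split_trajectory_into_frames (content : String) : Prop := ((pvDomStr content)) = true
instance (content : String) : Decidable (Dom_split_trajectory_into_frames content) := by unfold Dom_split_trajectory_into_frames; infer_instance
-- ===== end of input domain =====

-- B replaces A's buffer-accumulating single pass by a boundary-index-then-slice decomposition (alternative, same cost).

-- ===== PORT A =====
-- the for-loop over lines with state (frames, current_frame_lines), then the trailing-remainder check
def frameLoopA : List String → List String → List String → List String
  | [], frames, cur =>
      if cur ≠ [] then
        let remaining := PySem.Str.strip (PySem.Str.join "\n" cur)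
        if remaining ≠ "" then frames ++ [remaining] else frames
      else frames
  | l :: ls, frames, cur =>
      let cur' := cur ++ [l]
      if PySem.Str.strip l == "ENDMDL" then
        frameLoopA ls (frames ++ [PySem.Str.join "\n" cur']) []
      else
        frameLoopA ls frames cur'

def split_trajectory_into_frames (content : String) : List String :=
  frameLoopA (PySem.Str.splitlines content) [] []

-- ===== PORT B =====
-- the for-loop over boundaries with state (frames, start), then the trailing slice;
-- start and the boundaries b are enumerate indices, hence ≥ 0, so lines[start:b+1] is
-- (lines.drop start.toNat).take (b+1-start).toNat and lines[start:] is lines.drop start.toNat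
def goB (lines : List String) : List Int → Int → List String → List String
  | [], start, frames =>
      let tail := lines.drop start.toNat
      if tail ≠ [] then
        let remaining := PySem.Str.strip (PySem.Str.join "\n" tail)
        if remaining ≠ "" then frames ++ [remaining] else frames
      else frames
  | b :: bs, start, frames =>
      goB lines bs (b + 1)
        (frames ++ [PySem.Str.join "\n" ((lines.drop start.toNat).take (b + 1 - start).toNat)])

def split_trajectory_into_frames_alt (content : String) : List String :=
  let lines := PySem.Str.splitlines content
  let boundaries :=
    ((PySem.List.enumerate lines 0).filter (fun p => PySem.Str.strip p.2 == "ENDMDL")).map (·.1)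
  goB lines boundaries 0 []

-- ===== PRECONDITION & SPEC =====
def Spec_split_trajectory_into_frames (content : String) (out : List String) : Prop := out = split_trajectory_into_frames_alt content
instance (content : String) (out : List String) : Decidable (Spec_split_trajectory_into_frames content out) := by unfold Spec_split_trajectory_into_frames; infer_instance

-- ===== CLAIM (what is proved, stated in full; the proofs are below) =====
def Claim_equal_split_trajectory_into_frames : Prop := ∀ (content : String), Dom_split_trajectory_into_frames content → Spec_split_trajectory_into_frames content (split_trajectory_into_frames content)

-- ===== LEMMAS AND PROOFS =====

def pvBnd (ls : List String) : List Int :=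
  ((PySem.List.enumerate ls 0).filter (fun p => PySem.Str.strip p.2 == "ENDMDL")).map (·.1)

def pvFinish (xs : List String) : List String :=
  if xs ≠ [] then
    let remaining := PySem.Str.strip (PySem.Str.join "\n" xs)
    if remaining ≠ "" then [remaining] else []
  else []

-- B's value as a function of the boundary list of ls, with a pending prefix cur glued to the first frame
def pvGoBC2 (ls cur : List String) : List Int → List String
  | [] => pvFinish (cur ++ ls)
  | b :: rest =>
      PySem.Str.join "\n" (cur ++ ls.take (b + 1).toNat) :: goB ls rest (b + 1) []

def pvGoBC (ls cur : List String) : List String := pvGoBC2 ls cur (pvBnd ls)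

theorem accA (ls : List String) : ∀ frames cur,
    frameLoopA ls frames cur = frames ++ frameLoopA ls [] cur := by
  induction ls with
  | nil =>
      intro frames cur
      simp only [frameLoopA]
      split_ifs <;> simp
  | cons l t ih =>
      intro frames cur
      simp only [frameLoopA]
      split_ifs with h
      · rw [ih (frames ++ _), ih ([] ++ _)]; simp
      · exact ih frames (cur ++ [l])

theorem accB (bs : List Int) : ∀ (lines : List String) start frames,
    goB lines bs start frames = frames ++ goB lines bs start [] := by
  induction bs with
  | nil =>
      intro lines start frames
      simp only [goB]
      split_ifs <;> simp
  | cons b bs ih =>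
      intro lines start frames
      simp only [goB]
      rw [ih lines (b + 1) (frames ++ _), ih lines (b + 1) ([] ++ _)]
      simp

theorem enumerate_shift {α : Type} (xs : List α) : ∀ s : Int,
    PySem.List.enumerate xs (s + 1) = (PySem.List.enumerate xs s).map (fun p => (p.1 + 1, p.2)) := by
  induction xs with
  | nil => intro s; simp [PySem.List.enumerate_nil]
  | cons x t ih => intro s; simp [PySem.List.enumerate_cons, ih (s + 1)]

theorem pvBnd_cons (l : String) (t : List String) :
    pvBnd (l :: t) =
      if PySem.Str.strip l == "ENDMDL" then 0 :: (pvBnd t).map (· + 1)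
      else (pvBnd t).map (· + 1) := by
  simp only [pvBnd, PySem.List.enumerate_cons]
  rw [show (0 : Int) + 1 = 0 + 1 by ring, enumerate_shift]
  split_ifs with h <;>
    simp [h, List.filter_map, List.map_map, Function.comp_def]

theorem pvBnd_nonneg (ls : List String) : ∀ b ∈ pvBnd ls, 0 ≤ b := by
  intro b hb
  simp only [pvBnd, List.mem_map, List.mem_filter] at hb
  obtain ⟨p, ⟨hp, _⟩, rfl⟩ := hb
  rw [PySem.List.mem_enumerate_iff] at hp
  obtain ⟨k, hk, rfl⟩ := hp
  simp

theorem goB_shift (bs : List Int) : ∀ (l : String) (t : List String) (start : Int),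
    0 ≤ start → (∀ b ∈ bs, 0 ≤ b) →
    goB (l :: t) (bs.map (· + 1)) (start + 1) [] = goB t bs start [] := by
  induction bs with
  | nil =>
      intro l t start hs _
      simp only [goB, List.map_nil]
      rw [show (start + 1).toNat = start.toNat + 1 by omega]
      simp
  | cons b bs ih =>
      intro l t start hs hbs
      simp only [List.map_cons, goB]
      rw [accB _ _ _ ([] ++ _), accB _ _ _ ([] ++ _)]
      have hb : (0 : Int) ≤ b := hbs b (by simp)
      rw [show b + 1 + 1 - (start + 1) = b + 1 - start by ring,
          show (start + 1).toNat = start.toNat + 1 by omega,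
          List.drop_succ_cons,
          ih l t (b + 1) (by omega) (fun x hx => hbs x (by simp [hx]))]

theorem goB_bnd (ls : List String) : goB ls (pvBnd ls) 0 [] = pvGoBC ls [] := by
  rw [pvGoBC]
  cases hbt : pvBnd ls with
  | nil => simp [goB, pvGoBC2, pvFinish]
  | cons b rest =>
      simp only [goB, pvGoBC2]
      rw [accB]
      simp

theorem main_lemma (ls : List String) : ∀ cur,
    frameLoopA ls [] cur = pvGoBC ls cur := by
  induction ls with
  | nil =>
      intro cur
      simp only [frameLoopA, pvGoBC, pvBnd, PySem.List.enumerate_nil, List.filter_nil,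
        List.map_nil, pvGoBC2, pvFinish, List.append_nil]
      split_ifs <;> simp
  | cons l t ih =>
      intro cur
      simp only [frameLoopA]
      split_ifs with h
      · -- ENDMDL line: closes a frame
        rw [accA, ih []]
        conv_rhs => rw [pvGoBC, pvBnd_cons, if_pos h]
        have hshift : goB (l :: t) ((pvBnd t).map (· + 1)) 1 [] = goB t (pvBnd t) 0 [] := by
          have := goB_shift (pvBnd t) l t 0 le_rfl (pvBnd_nonneg t)
          simpa using this
        simp only [pvGoBC2]
        simp
        rw [hshift]
        exact (goB_bnd t).symm
      · -- ordinary line: goes into the pending buffer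
        rw [ih (cur ++ [l])]
        conv_rhs => rw [pvGoBC, pvBnd_cons, if_neg h]
        rw [pvGoBC]
        cases hbt : pvBnd t with
        | nil => simp [pvGoBC2, pvFinish]
        | cons b rest =>
            have hb : (0 : Int) ≤ b := pvBnd_nonneg t b (by simp [hbt])
            simp only [List.map_cons, pvGoBC2]
            have hshift := goB_shift rest l t (b + 1) (by omega)
              (fun x hx => pvBnd_nonneg t x (by simp [hbt, hx]))
            rw [show (b + 1 + 1).toNat = (b + 1).toNat + 1 by omega, List.take_succ_cons,
                hshift]
            simp

-- ===== VERDICT (by name: the statement is the Claim_ definition above) =====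
theorem split_trajectory_into_frames_spec : Claim_equal_split_trajectory_into_frames := by
  intro content _
  unfold Spec_split_trajectory_into_frames split_trajectory_into_frames split_trajectory_into_frames_alt
  rw [main_lemma]
  exact (goB_bnd _).symm
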